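-- pv_equiv track=rewrite | github.com/wbsg-uni-mannheim/productCategorization | src/models/transformers/custom_transformers/modules/hierarchical_classification_head.py | initialize_paths_per_lvl
-- ===== SOURCE A (Python) =====
-- def initialize_paths_per_lvl(paths):
--     length = max([len(path) for path in paths])
--     added_paths = set()
--     paths_per_lvl = {}
--     for i in range(length):
--         paths_per_lvl[i+1] = []
--         for path in paths:
--             new_path = path[:i+1]
--             new_tuple = tuple(new_path)
--             if not (new_tuple in added_paths):
--                 added_paths.add(new_tuple)
--                 paths_per_lvl[i+1].append(new_path)
--
--     return paths_per_lvl
-- ===== SOURCE B (Python) =====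
-- def initialize_paths_per_lvl(paths):
--     # Single pass in path order: each path registers its chain of prefixes depth by
--     # depth, appending a prefix to its level's list the first time it is seen (an
--     # empty path still registers its own level-1 prefix []).
--     length = max(len(path) for path in paths)
--     paths_per_lvl = {lvl: [] for lvl in range(1, length + 1)}
--     if length == 0:
--         return paths_per_lvl
--     seen = set()
--     for path in paths:
--         for d in range(1, max(len(path), 1) + 1):
--             prefix = path[:d]
--             t = tuple(prefix)
--             if t not in seen:
--                 seen.add(t)
--                 paths_per_lvl[d].append(prefix)
--     return paths_per_lvl
-- ===== Notes on version B (the rewrite author's own statement) =====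
-- stated objective: alternative
-- what changed: A's level-major double loop (for every level, rescan all paths and dedup slices against one global cross-level seen set) is replaced by a single path-major pass: each path is visited once and registers its chain of prefixes depth by depth, a prefix being appended to its level's bucket the first time it is ever seen; the per-level buckets are created up front from the maximum length.
import Mathlib
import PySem

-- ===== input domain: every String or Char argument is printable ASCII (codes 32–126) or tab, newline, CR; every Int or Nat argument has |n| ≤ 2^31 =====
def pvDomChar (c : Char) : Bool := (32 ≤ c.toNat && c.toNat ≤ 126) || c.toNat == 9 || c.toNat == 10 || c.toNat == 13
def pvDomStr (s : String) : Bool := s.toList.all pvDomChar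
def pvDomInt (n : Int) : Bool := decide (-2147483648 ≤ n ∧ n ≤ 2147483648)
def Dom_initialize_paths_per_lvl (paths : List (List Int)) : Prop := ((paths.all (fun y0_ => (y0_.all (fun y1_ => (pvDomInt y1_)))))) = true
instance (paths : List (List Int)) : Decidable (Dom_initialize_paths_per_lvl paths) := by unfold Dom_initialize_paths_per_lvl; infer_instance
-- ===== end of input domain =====

-- B replaces A's level-major double loop (rescanning all paths at every level against a
-- global seen set) by a single path-major pass: each path registers its chain of prefixes
-- depth by depth, a prefix being appended to its level's list the first time it is seen.

-- ===== PORT A =====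
-- body of A's inner 'for path in paths' loop; state = (added_paths, paths_per_lvl)
def pvAInner (lvl : Int) (st : PySem.Set (List Int) × PySem.Dict Int (List (List Int)))
    (path : List Int) : PySem.Set (List Int) × PySem.Dict Int (List (List Int)) :=
  let new_path := PySem.List.slice path none (some lvl)   -- path[:i+1]
  if PySem.Set.contains st.1 new_path then st
  else (PySem.Set.add st.1 new_path,
        st.2.modify lvl [] (fun l => l ++ [new_path]))    -- paths_per_lvl[i+1].append(new_path)

-- body of A's outer 'for i in range(length)' loop
def pvAStep (paths : List (List Int))
    (st : PySem.Set (List Int) × PySem.Dict Int (List (List Int))) (i : Int) :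
    PySem.Set (List Int) × PySem.Dict Int (List (List Int)) :=
  paths.foldl (pvAInner (i + 1)) (st.1, st.2.insert (i + 1) [])   -- paths_per_lvl[i+1] = []

def initialize_paths_per_lvl (paths : List (List Int)) : List (Int × List (List Int)) :=
  match PySem.List.max? (paths.map (fun path => (path.length : Int))) (fun x => x) with
  | none => []   -- Python: max([]) raises ValueError; excluded by Pre_
  | some length =>
    ((PySem.List.pyRange 0 length 1).foldl (pvAStep paths)
      (PySem.Set.ofList [], PySem.Dict.empty)).2.items

-- ===== PORT B =====
-- body of B's inner 'for d in range(1, max(len(path), 1) + 1)' loop; state = (seen, paths_per_lvl)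
def pvBDepth (path : List Int) (st : PySem.Set (List Int) × PySem.Dict Int (List (List Int)))
    (d : Int) : PySem.Set (List Int) × PySem.Dict Int (List (List Int)) :=
  let pfx := PySem.List.slice path none (some d)          -- path[:d]
  if PySem.Set.contains st.1 pfx then st
  else (PySem.Set.add st.1 pfx,
        st.2.modify d [] (fun l => l ++ [pfx]))           -- paths_per_lvl[d].append(prefix)

-- body of B's outer 'for path in paths' loop
def pvBPath (st : PySem.Set (List Int) × PySem.Dict Int (List (List Int)))
    (path : List Int) : PySem.Set (List Int) × PySem.Dict Int (List (List Int)) :=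
  (PySem.List.pyRange 1 (max (path.length : Int) 1 + 1) 1).foldl (pvBDepth path) st

-- paths_per_lvl = {lvl: [] for lvl in range(1, length + 1)}
def pvBInit (length : Int) : PySem.Dict Int (List (List Int)) :=
  (PySem.List.pyRange 1 (length + 1) 1).foldl
    (fun d lvl => d.insert lvl ([] : List (List Int))) PySem.Dict.empty

def initialize_paths_per_lvl_alt (paths : List (List Int)) : List (Int × List (List Int)) :=
  match PySem.List.max? (paths.map (fun path => (path.length : Int))) (fun x => x) with
  | none => []   -- Source B: max over an empty sequence raises ValueError; excluded by Pre_
  | some length =>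
    if length = 0 then (pvBInit length).items
    else (paths.foldl pvBPath (PySem.Set.ofList [], pvBInit length)).2.items

-- ===== PRECONDITION & SPEC =====
-- Pre_ excludes only the empty list, on which both A and B raise ValueError (max of an empty sequence).
def Pre_initialize_paths_per_lvl (paths : List (List Int)) : Prop := paths ≠ []
instance (paths : List (List Int)) : Decidable (Pre_initialize_paths_per_lvl paths) := by
  unfold Pre_initialize_paths_per_lvl; infer_instance

def pvWitness_initialize_paths_per_lvl : List (List Int) := [[7], [7, 2], []]

def Spec_initialize_paths_per_lvl (paths : List (List Int)) (out : List (Int × List (List Int))) : Prop := out = initialize_paths_per_lvl_alt paths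
instance (paths : List (List Int)) (out : List (Int × List (List Int))) : Decidable (Spec_initialize_paths_per_lvl paths out) := by unfold Spec_initialize_paths_per_lvl; infer_instance

-- ===== CLAIM (what is proved, stated in full; the proofs are below) =====
def Claim_equal_initialize_paths_per_lvl : Prop := ∀ (paths : List (List Int)), Dom_initialize_paths_per_lvl paths → Pre_initialize_paths_per_lvl paths → Spec_initialize_paths_per_lvl paths (initialize_paths_per_lvl paths)

-- ===== LEMMAS AND PROOFS =====

-- A canonical level-major per-level list (the shape A's loops produce), used as the
-- common normal form both ports are reduced to.
def pvBStepT (lvl : Nat) (st : PySem.Set (List Int) × List (List Int)) (path : List Int) :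
    PySem.Set (List Int) × List (List Int) :=
  if lvl = 1 ∨ lvl ≤ path.length then
    let t := path.take lvl
    if PySem.Set.contains st.1 t then st
    else (PySem.Set.add st.1 t, st.2 ++ [t])
  else st

def pvLvlList (lvl : Nat) (done : List (List Int)) : List (List Int) :=
  (done.foldl (pvBStepT lvl) (PySem.Set.ofList [], [])).2

-- Nat-indexed versions of the two inner-loop bodies (path[:d] becomes List.take d)
def pvAInnerT (lvl : Nat) (st : PySem.Set (List Int) × PySem.Dict Int (List (List Int)))
    (path : List Int) : PySem.Set (List Int) × PySem.Dict Int (List (List Int)) :=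
  let t := path.take lvl
  if PySem.Set.contains st.1 t then st
  else (PySem.Set.add st.1 t, st.2.modify (lvl : Int) [] (fun l => l ++ [t]))

def pvBDepthT (path : List Int) (st : PySem.Set (List Int) × PySem.Dict Int (List (List Int)))
    (d : Nat) : PySem.Set (List Int) × PySem.Dict Int (List (List Int)) :=
  let t := path.take d
  if PySem.Set.contains st.1 t then st
  else (PySem.Set.add st.1 t, st.2.modify (d : Int) [] (fun l => l ++ [t]))

lemma pvAInner_natCast (m : Nat) : pvAInner (m : Int) = pvAInnerT m := by
  funext st path
  simp only [pvAInner, pvAInnerT, PySem.List.slice_to_natCast]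

lemma pvBDepth_natCast (path : List Int) (st : PySem.Set (List Int) × PySem.Dict Int (List (List Int))) (m : Nat) :
    pvBDepth path st (m : Int) = pvBDepthT path st m := by
  simp only [pvBDepth, pvBDepthT, PySem.List.slice_to_natCast]

-- the accumulator of the level-major fold only ever appends, and does not influence the seen set
lemma pvBfold_acc (lvl : Nat) (ps : List (List Int)) (T : PySem.Set (List Int))
    (acc : List (List Int)) :
    ps.foldl (pvBStepT lvl) (T, acc) =
      ((ps.foldl (pvBStepT lvl) (T, [])).1, acc ++ (ps.foldl (pvBStepT lvl) (T, [])).2) := by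
  induction ps generalizing T acc with
  | nil => simp
  | cons p ps ih =>
    simp only [List.foldl_cons]
    by_cases hc : lvl = 1 ∨ lvl ≤ p.length
    · by_cases hs : PySem.Set.contains T (p.take lvl) = true
      · simp only [pvBStepT, hc, if_pos, hs]
        exact ih T acc
      · simp only [pvBStepT, hc, if_pos, hs]
        simp only [Bool.false_eq_true, if_false]
        rw [ih (T.add (p.take lvl)) (acc ++ [p.take lvl]),
            ih (T.add (p.take lvl)) ([] ++ [p.take lvl])]
        simp
    · simp only [pvBStepT, hc, if_false]
      exact ih T acc

-- the seen set of the level-major fold is exactly the admitted level-lvl slices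
lemma pvLocalSeen (lvl : Nat) (ps : List (List Int)) (T : PySem.Set (List Int))
    (acc : List (List Int)) (t : List Int) :
    t ∈ (ps.foldl (pvBStepT lvl) (T, acc)).1 ↔
      t ∈ T ∨ ∃ q ∈ ps, (lvl = 1 ∨ lvl ≤ q.length) ∧ t = q.take lvl := by
  induction ps generalizing T acc with
  | nil => simp
  | cons p ps ih =>
    simp only [List.foldl_cons]
    by_cases hc : lvl = 1 ∨ lvl ≤ p.length
    · by_cases hs : p.take lvl ∈ T
      · rw [show pvBStepT lvl (T, acc) p = (T, acc) by simp [pvBStepT, hc, hs], ih]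
        constructor
        · rintro (h | ⟨q, hq, hcq, rfl⟩)
          · exact Or.inl h
          · exact Or.inr ⟨q, List.mem_cons_of_mem _ hq, hcq, rfl⟩
        · rintro (h | ⟨q, hq, hcq, rfl⟩)
          · exact Or.inl h
          · rcases List.mem_cons.mp hq with rfl | hq'
            · exact Or.inl hs
            · exact Or.inr ⟨q, hq', hcq, rfl⟩
      · rw [show pvBStepT lvl (T, acc) p = (T.add (p.take lvl), acc ++ [p.take lvl]) by
              simp [pvBStepT, hc, hs], ih, PySem.Set.mem_add]
        constructor
        · rintro ((h | rfl) | ⟨q, hq, hcq, rfl⟩)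
          · exact Or.inl h
          · exact Or.inr ⟨p, by simp, hc, rfl⟩
          · exact Or.inr ⟨q, by simp [hq], hcq, rfl⟩
        · rintro (h | ⟨q, hq, hcq, rfl⟩)
          · exact Or.inl (Or.inl h)
          · rcases List.mem_cons.mp hq with rfl | hq'
            · exact Or.inl (Or.inr rfl)
            · exact Or.inr ⟨q, hq', hcq, rfl⟩
    · rw [show pvBStepT lvl (T, acc) p = (T, acc) by simp [pvBStepT, hc], ih]
      constructor
      · rintro (h | ⟨q, hq, hcq, rfl⟩)
        · exact Or.inl h
        · exact Or.inr ⟨q, by simp [hq], hcq, rfl⟩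
      · rintro (h | ⟨q, hq, hcq, rfl⟩)
        · exact Or.inl h
        · rcases List.mem_cons.mp hq with rfl | hq'
          · exact absurd hcq hc
          · exact Or.inr ⟨q, hq', hcq, rfl⟩

-- A's inner loop emits the canonical per-level list (S decides 'already recorded at a
-- lower level' exactly by the length criterion, modulo the local seen set T)
lemma pvInner (lvl : Nat) (hl : 1 ≤ lvl) (ps : List (List Int))
    (S T : PySem.Set (List Int)) (d : PySem.Dict Int (List (List Int)))
    (h : ∀ p ∈ ps, (p.take lvl ∈ S ↔ ((2 ≤ lvl ∧ p.length < lvl) ∨ p.take lvl ∈ T))) :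
    (∀ t, t ∈ (ps.foldl (pvAInnerT lvl) (S, d)).1 ↔ (t ∈ S ∨ ∃ p ∈ ps, t = p.take lvl))
    ∧ (ps.foldl (pvAInnerT lvl) (S, d)).2 =
        ((ps.foldl (pvBStepT lvl) (T, [])).2).foldl
          (fun d t => d.modify (lvl : Int) [] (fun l => l ++ [t])) d := by
  induction ps generalizing S T d with
  | nil => simp
  | cons p ps ih =>
    have hp := h p (by simp)
    simp only [List.foldl_cons]
    by_cases hc : p.take lvl ∈ S
    · -- A skips; the canonical list skips too
      have hA : pvAInnerT lvl (S, d) p = (S, d) := by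
        simp [pvAInnerT, hc]
      have hB : pvBStepT lvl (T, []) p = (T, []) := by
        rcases hp.mp hc with ⟨h2, h3⟩ | hT
        · simp [pvBStepT, show ¬(lvl = 1 ∨ lvl ≤ p.length) by omega]
        · by_cases hf : lvl = 1 ∨ lvl ≤ p.length
          · simp [pvBStepT, hf, hT]
          · simp [pvBStepT, hf]
      rw [hA, hB]
      obtain ⟨ih1, ih2⟩ := ih S T d (fun q hq => h q (by simp [hq]))
      refine ⟨fun t => ?_, ih2⟩
      rw [ih1 t]
      constructor
      · rintro (hs | ⟨q, hq, rfl⟩)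
        · exact Or.inl hs
        · exact Or.inr ⟨q, by simp [hq]⟩
      · rintro (hs | ⟨q, hq, rfl⟩)
        · exact Or.inl hs
        · rcases List.mem_cons.mp hq with rfl | hq'
          · exact Or.inl hc
          · exact Or.inr ⟨q, hq', rfl⟩
    · -- both emit p.take lvl
      have hnotT : p.take lvl ∉ T := fun hT => hc (hp.mpr (Or.inr hT))
      have hflt : lvl = 1 ∨ lvl ≤ p.length := by
        by_contra hn
        exact hc (hp.mpr (Or.inl (by omega)))
      have hA : pvAInnerT lvl (S, d) p =
          (PySem.Set.add S (p.take lvl), d.modify (lvl : Int) [] (fun l => l ++ [p.take lvl])) := by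
        simp [pvAInnerT, hc]
      have hB : pvBStepT lvl (T, []) p = (PySem.Set.add T (p.take lvl), [] ++ [p.take lvl]) := by
        simp [pvBStepT, hflt, hnotT]
      rw [hA, hB]
      have hnew : ∀ q ∈ ps, (q.take lvl ∈ PySem.Set.add S (p.take lvl) ↔
          ((2 ≤ lvl ∧ q.length < lvl) ∨ q.take lvl ∈ PySem.Set.add T (p.take lvl))) := by
        intro q hq
        rw [PySem.Set.mem_add, PySem.Set.mem_add, h q (by simp [hq])]
        tauto
      obtain ⟨ih1, ih2⟩ := ih (PySem.Set.add S (p.take lvl)) (PySem.Set.add T (p.take lvl))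
        (d.modify (lvl : Int) [] (fun l => l ++ [p.take lvl])) hnew
      constructor
      · intro t
        rw [ih1 t, PySem.Set.mem_add]
        constructor
        · rintro ((hs | rfl) | ⟨q, hq, rfl⟩)
          · exact Or.inl hs
          · exact Or.inr ⟨p, by simp⟩
          · exact Or.inr ⟨q, by simp [hq]⟩
        · rintro (hs | ⟨q, hq, rfl⟩)
          · exact Or.inl (Or.inl hs)
          · rcases List.mem_cons.mp hq with rfl | hq'
            · exact Or.inl (Or.inr rfl)
            · exact Or.inr ⟨q, hq', rfl⟩
      · rw [ih2, pvBfold_acc lvl ps (PySem.Set.add T (p.take lvl)) ([] ++ [p.take lvl])]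
        simp

-- a prefix of length lvl = k+1 was recorded at a level ≤ k iff the path is short enough
lemma pvSeenChar (paths : List (List Int)) (p : List Int) (hp : p ∈ paths) (k : Nat) :
    (∃ q ∈ paths, ∃ j : Nat, 1 ≤ j ∧ j ≤ k ∧ p.take (k + 1) = q.take j) ↔
      (1 ≤ k ∧ p.length ≤ k) := by
  constructor
  · rintro ⟨q, hq, j, hj1, hjk, he⟩
    have hlen := congrArg List.length he
    simp only [List.length_take] at hlen
    have := List.length_take_le j q
    constructor <;> omega
  · rintro ⟨hk, hp2⟩
    refine ⟨p, hp, max p.length 1, by omega, by omega, ?_⟩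
    rw [List.take_of_length_le (by omega), List.take_of_length_le (by omega)]

-- appending an element to the value of the (fresh) last key of a dict
lemma pvModifyLast (l : List (Int × List (List Int))) (v : List (List Int)) (lvl : Int)
    (t : List Int) (hfresh : ∀ q ∈ l, q.1 ≠ lvl) :
    (PySem.Dict.mk (l ++ [(lvl, v)])).modify lvl [] (fun w => w ++ [t]) =
      PySem.Dict.mk (l ++ [(lvl, v ++ [t])]) := by
  have hfind : List.find? (fun p => p.1 == lvl) (l ++ [(lvl, v)]) = some (lvl, v) := by
    induction l with
    | nil => simp
    | cons q l ih =>
      rw [List.cons_append, List.find?_cons_of_neg, ih (fun r hr => hfresh r (by simp [hr]))]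
      simp [hfresh q (by simp)]
  have hcont : (PySem.Dict.mk (l ++ [(lvl, v)])).contains lvl = true := by
    simp [PySem.Dict.contains]
  simp only [PySem.Dict.modify, PySem.Dict.getD, PySem.Dict.get?, hfind, Option.map_some,
    Option.getD_some, PySem.Dict.insert, hcont, if_true]
  congr 1
  simp only [List.map_append]
  congr 1
  · conv_rhs => rw [← List.map_id l]
    exact List.map_congr_left (fun q hq => by simp [hfresh q hq])
  · simp

-- repeatedly appending to the value of the last key of a dict
lemma pvItemsFold (E : List (List Int)) (l : List (Int × List (List Int)))
    (v : List (List Int)) (lvl : Int) (hfresh : ∀ q ∈ l, q.1 ≠ lvl) :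
    (E.foldl (fun d t => d.modify lvl [] (fun w => w ++ [t]))
        (PySem.Dict.mk (l ++ [(lvl, v)]))).items = l ++ [(lvl, v ++ E)] := by
  induction E generalizing v with
  | nil => simp
  | cons t E ih =>
    rw [List.foldl_cons, pvModifyLast l v lvl t hfresh, ih (v ++ [t])]
    simp

-- A's outer-loop invariant: after the first k levels the dict agrees with the canonical
-- level lists, and the seen set holds exactly the prefixes of length ≤ k
lemma pvOuterInv (paths : List (List Int)) (k : Nat) :
    ((PySem.List.pyRange 0 (k : Int) 1).foldl (pvAStep paths)
        (PySem.Set.ofList [], PySem.Dict.empty)).2.items =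
      (PySem.List.pyRange 1 ((k : Int) + 1) 1).map (fun lvl => (lvl, pvLvlList lvl.toNat paths))
    ∧ (∀ t, t ∈ ((PySem.List.pyRange 0 (k : Int) 1).foldl (pvAStep paths)
        (PySem.Set.ofList [], PySem.Dict.empty)).1 ↔
        ∃ p ∈ paths, ∃ j : Nat, 1 ≤ j ∧ j ≤ k ∧ t = p.take j) := by
  induction k with
  | zero =>
    rw [show ((0 : Nat) : Int) = 0 by rfl, PySem.List.pyRange_one_eq_nil le_rfl,
        show (0 : Int) + 1 = 1 by ring, PySem.List.pyRange_one_eq_nil le_rfl]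
    refine ⟨by simp [PySem.Dict.empty], fun t => ?_⟩
    simp only [List.foldl_nil]
    constructor
    · intro ht; simp [PySem.Set.ofList] at ht
    · rintro ⟨p, hp, j, hj1, hj0, rfl⟩; omega
  | succ k ih =>
    obtain ⟨ih1, ih2⟩ := ih
    have hcast : ((k + 1 : Nat) : Int) = (k : Int) + 1 := by push_cast; ring
    rw [hcast, PySem.List.pyRange_one_succ_right (by positivity), List.foldl_append]
    set stk := (PySem.List.pyRange 0 (k : Int) 1).foldl (pvAStep paths)
      (PySem.Set.ofList [], PySem.Dict.empty) with hstk
    simp only [List.foldl_cons, List.foldl_nil]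
    rw [show pvAStep paths stk (k : Int) =
      paths.foldl (pvAInner ((k : Int) + 1)) (stk.1, stk.2.insert ((k : Int) + 1) []) from rfl]
    rw [show (k : Int) + 1 = ((k + 1 : Nat) : Int) from hcast.symm, pvAInner_natCast]
    have h : ∀ p ∈ paths, (p.take (k + 1) ∈ stk.1 ↔
        ((2 ≤ k + 1 ∧ p.length < k + 1) ∨ p.take (k + 1) ∈ ([] : PySem.Set (List Int)))) := by
      intro p hp
      rw [ih2, pvSeenChar paths p hp k]
      simp only [List.not_mem_nil, or_false]
      omega
    obtain ⟨c1, c2⟩ := pvInner (k + 1) (by omega) paths stk.1 []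
      (stk.2.insert ((k + 1 : Nat) : Int) []) h
    have hfreshk : ∀ q ∈ (PySem.List.pyRange 1 ((k : Int) + 1) 1).map
        (fun lvl => (lvl, pvLvlList lvl.toNat paths)), q.1 ≠ ((k + 1 : Nat) : Int) := by
      intro q hq
      obtain ⟨lvl, hlvl, rfl⟩ := List.mem_map.mp hq
      have := PySem.List.mem_pyRange_one.mp hlvl
      simp only [hcast]
      omega
    have hcont : stk.2.contains ((k + 1 : Nat) : Int) = false := by
      rw [PySem.Dict.contains_eq_isSome_get?]
      simp only [PySem.Dict.get?]
      rw [List.find?_eq_none.mpr]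
      · rfl
      · intro q hq
        simp only [beq_iff_eq]
        exact hfreshk q (by rw [← ih1]; exact hq)
    have hins : stk.2.insert ((k + 1 : Nat) : Int) [] =
        PySem.Dict.mk (((PySem.List.pyRange 1 ((k : Int) + 1) 1).map
          (fun lvl => (lvl, pvLvlList lvl.toNat paths))) ++ [(((k + 1 : Nat) : Int), [])]) := by
      simp only [PySem.Dict.insert, hcont, Bool.false_eq_true, if_false]
      rw [← ih1]
    have hE : (paths.foldl (pvBStepT (k + 1)) ([], [])).2 = pvLvlList (k + 1) paths := by
      simp [pvLvlList, PySem.Set.ofList]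
    constructor
    · rw [c2, hins, hE, pvItemsFold _ _ _ _ hfreshk, hcast,
          PySem.List.pyRange_one_succ_right (by omega : (1 : Int) ≤ (k : Int) + 1),
          List.map_append]
      simp [pvLvlList]
    · intro t
      rw [c1 t, ih2]
      constructor
      · rintro (⟨p, hp, j, hj1, hjk, rfl⟩ | ⟨p, hp, rfl⟩)
        · exact ⟨p, hp, j, hj1, by omega, rfl⟩
        · exact ⟨p, hp, k + 1, by omega, by omega, rfl⟩
      · rintro ⟨p, hp, j, hj1, hjk, rfl⟩
        rcases Nat.lt_or_ge j (k + 1) with hj | hj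
        · exact Or.inl ⟨p, hp, j, hj1, by omega, rfl⟩
        · exact Or.inr ⟨p, hp, by rw [show j = k + 1 by omega]⟩

-- ===== stage 2: B's path-major pass produces the same canonical level lists =====

-- two admitted prefixes can only coincide at the same depth
lemma pvTakeEq {p q : List Int} {d j : Nat} (hd1 : 1 ≤ d) (hd : d ≤ max p.length 1)
    (hj1 : 1 ≤ j) (hj : j ≤ max q.length 1) (h : p.take d = q.take j) : j = d := by
  have h' := congrArg List.length h
  simp only [List.length_take] at h'
  omega

-- pyRange 1 (k+1) has no duplicates
lemma pvRangeNodup (k : Nat) : (PySem.List.pyRange 1 ((k : Int) + 1) 1).Nodup := by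
  induction k with
  | zero => simp [PySem.List.pyRange_one_eq_nil]
  | succ k ih =>
    rw [show (((k + 1 : Nat) : Int) + 1) = ((k : Int) + 1) + 1 by push_cast; ring,
        PySem.List.pyRange_one_succ_right (by omega)]
    refine List.Nodup.append ih (by simp) ?_
    intro x hx hx'
    rcases List.mem_singleton.mp hx' with rfl
    have := PySem.List.mem_pyRange_one.mp hx
    omega

-- extending the canonical list by one path: levels the path does not reach are unchanged
lemma pvLvlSkip (m : Nat) (done : List (List Int)) (p : List Int)
    (h : ¬ (m = 1 ∨ m ≤ p.length)) : pvLvlList m (done ++ [p]) = pvLvlList m done := by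
  unfold pvLvlList
  rw [List.foldl_append, List.foldl_cons, List.foldl_nil]
  simp [pvBStepT, h]

-- extending the canonical list by one path at a level it reaches
lemma pvLvlSnoc (m : Nat) (done : List (List Int)) (p : List Int)
    (h : m = 1 ∨ m ≤ p.length) :
    pvLvlList m (done ++ [p]) =
      if ∃ q ∈ done, (m = 1 ∨ m ≤ q.length) ∧ p.take m = q.take m
      then pvLvlList m done else pvLvlList m done ++ [p.take m] := by
  unfold pvLvlList
  rw [List.foldl_append, List.foldl_cons, List.foldl_nil]
  by_cases hq : ∃ q ∈ done, (m = 1 ∨ m ≤ q.length) ∧ p.take m = q.take m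
  · have hmem : p.take m ∈ (done.foldl (pvBStepT m) (PySem.Set.ofList [], [])).1 := by
      rw [pvLocalSeen]
      exact Or.inr hq
    rw [show (PySem.Set.ofList [] : PySem.Set (List Int)) = [] from rfl] at hmem
    rw [if_pos hq]
    simp [pvBStepT, h, hmem]
  · have hmem : p.take m ∉ (done.foldl (pvBStepT m) (PySem.Set.ofList [], [])).1 := by
      rw [pvLocalSeen]
      rintro (habs | hq')
      · simp [PySem.Set.ofList] at habs
      · exact hq hq'
    rw [show (PySem.Set.ofList [] : PySem.Set (List Int)) = [] from rfl] at hmem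
    rw [if_neg hq]
    simp [pvBStepT, h, hmem]

-- B's inner (depth) loop, cut off after the first e depths
lemma pvDepthAux (k : Nat) (done : List (List Int)) (p : List Int)
    (hp : max p.length 1 ≤ k)
    (S : PySem.Set (List Int)) (D : PySem.Dict Int (List (List Int)))
    (hS : ∀ t, t ∈ S ↔ ∃ q ∈ done, ∃ j : Nat, 1 ≤ j ∧ j ≤ max q.length 1 ∧ t = q.take j)
    (hkeys : D.keys = PySem.List.pyRange 1 ((k : Int) + 1) 1)
    (hD : ∀ m : Nat, 1 ≤ m → m ≤ k → D.getD (m : Int) [] = pvLvlList m done)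
    (e : Nat) (he : e ≤ max p.length 1) :
    (∀ t, t ∈ ((PySem.List.pyRange 1 ((e : Int) + 1) 1).foldl (pvBDepth p) (S, D)).1 ↔
        ((∃ q ∈ done, ∃ j : Nat, 1 ≤ j ∧ j ≤ max q.length 1 ∧ t = q.take j) ∨
         (∃ j : Nat, 1 ≤ j ∧ j ≤ e ∧ t = p.take j)))
    ∧ ((PySem.List.pyRange 1 ((e : Int) + 1) 1).foldl (pvBDepth p) (S, D)).2.keys =
        PySem.List.pyRange 1 ((k : Int) + 1) 1
    ∧ (∀ m : Nat, 1 ≤ m → m ≤ k →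
        ((PySem.List.pyRange 1 ((e : Int) + 1) 1).foldl (pvBDepth p) (S, D)).2.getD (m : Int) [] =
          if m ≤ e then pvLvlList m (done ++ [p]) else pvLvlList m done) := by
  revert he
  induction e with
  | zero =>
    intro he
    rw [show ((0 : Nat) : Int) + 1 = 1 by norm_num, PySem.List.pyRange_one_eq_nil le_rfl]
    simp only [List.foldl_nil]
    refine ⟨fun t => ?_, hkeys, fun m h1 hk => ?_⟩
    · rw [hS t]
      constructor
      · exact Or.inl
      · rintro (h | ⟨j, hj1, hj0, rfl⟩)
        · exact h
        · omega
    · rw [if_neg (by omega), hD m h1 hk]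
  | succ e ih =>
    intro he
    obtain ⟨a, b, c⟩ := ih (by omega)
    rw [show ((e + 1 : Nat) : Int) + 1 = (((e : Nat) : Int) + 1) + 1 by push_cast; ring,
        PySem.List.pyRange_one_succ_right (by omega : (1 : Int) ≤ (e : Int) + 1),
        List.foldl_append]
    set st := (PySem.List.pyRange 1 ((e : Int) + 1) 1).foldl (pvBDepth p) (S, D) with hst
    simp only [List.foldl_cons, List.foldl_nil]
    rw [show ((e : Int) + 1) = ((e + 1 : Nat) : Int) by push_cast; ring, pvBDepth_natCast]
    have hcond : (e + 1) = 1 ∨ (e + 1) ≤ p.length := by omega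
    have hmem : p.take (e + 1) ∈ st.1 ↔
        ∃ q ∈ done, ((e + 1) = 1 ∨ (e + 1) ≤ q.length) ∧ p.take (e + 1) = q.take (e + 1) := by
      rw [a]
      constructor
      · rintro (⟨q, hq, j, hj1, hjq, hqt⟩ | ⟨j, hj1, hje, hjt⟩)
        · have hjd := pvTakeEq (by omega) he hj1 hjq hqt
          exact ⟨q, hq, by omega, by rw [hqt, hjd]⟩
        · have hjd := pvTakeEq (by omega) he hj1 (by omega) hjt
          omega
      · rintro ⟨q, hq, hcq, hqt⟩
        exact Or.inl ⟨q, hq, e + 1, by omega, by omega, hqt⟩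
    by_cases hin : ∃ q ∈ done, ((e + 1) = 1 ∨ (e + 1) ≤ q.length) ∧ p.take (e + 1) = q.take (e + 1)
    · rw [show pvBDepthT p st (e + 1) = st by simp [pvBDepthT, hmem.mpr hin]]
      refine ⟨fun t => ?_, b, fun m h1 hk => ?_⟩
      · rw [a t]
        constructor
        · rintro (h | ⟨j, hj1, hje, rfl⟩)
          · exact Or.inl h
          · exact Or.inr ⟨j, hj1, by omega, rfl⟩
        · rintro (h | ⟨j, hj1, hje1, rfl⟩)
          · exact Or.inl h
          · rcases Nat.lt_or_ge j (e + 1) with hj | hj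
            · exact Or.inr ⟨j, hj1, by omega, rfl⟩
            · have hj' : j = e + 1 := by omega
              subst hj'
              exact (a _).mp (hmem.mpr hin)
      · rw [c m h1 hk]
        by_cases hme : m ≤ e
        · rw [if_pos hme, if_pos (by omega)]
        · by_cases hme1 : m ≤ e + 1
          · have hm' : m = e + 1 := by omega
            subst hm'
            rw [if_neg hme, if_pos hme1, pvLvlSnoc (e + 1) done p hcond, if_pos hin]
          · rw [if_neg hme, if_neg hme1]
    · have hnm : p.take (e + 1) ∉ st.1 := fun h => hin (hmem.mp h)
      rw [show pvBDepthT p st (e + 1) =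
          (st.1.add (p.take (e + 1)),
           st.2.modify ((e + 1 : Nat) : Int) [] (fun l => l ++ [p.take (e + 1)]))
        by simp [pvBDepthT, hnm]]
      have hcontm : st.2.contains ((e + 1 : Nat) : Int) = true := by
        rw [PySem.Dict.contains_eq_decide_mem_keys, b, decide_eq_true_eq,
            PySem.List.mem_pyRange_one]
        push_cast
        omega
      refine ⟨fun t => ?_, ?_, fun m h1 hk => ?_⟩
      · rw [PySem.Set.mem_add, a t]
        constructor
        · rintro ((h | ⟨j, hj1, hje, rfl⟩) | rfl)
          · exact Or.inl h
          · exact Or.inr ⟨j, hj1, by omega, rfl⟩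
          · exact Or.inr ⟨e + 1, by omega, le_rfl, rfl⟩
        · rintro (h | ⟨j, hj1, hje1, rfl⟩)
          · exact Or.inl (Or.inl h)
          · rcases Nat.lt_or_ge j (e + 1) with hj | hj
            · exact Or.inl (Or.inr ⟨j, hj1, by omega, rfl⟩)
            · have hj' : j = e + 1 := by omega
              subst hj'
              exact Or.inr rfl
      · rw [PySem.Dict.keys_modify, PySem.Dict.keys_insert_of_contains _ _ hcontm, b]
      · rw [PySem.Dict.getD_modify]
        by_cases hm : m = e + 1
        · subst hm
          rw [if_pos rfl, c (e + 1) h1 hk, if_neg (by omega), if_pos le_rfl,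
              pvLvlSnoc (e + 1) done p hcond, if_neg hin]
        · rw [if_neg (by omega), c m h1 hk]
          by_cases hme : m ≤ e
          · rw [if_pos hme, if_pos (by omega)]
          · rw [if_neg hme, if_neg (by omega)]

-- B's inner (depth) loop: one path registers its whole prefix chain
lemma pvDepthLoop (k : Nat) (done : List (List Int)) (p : List Int)
    (hp : max p.length 1 ≤ k)
    (S : PySem.Set (List Int)) (D : PySem.Dict Int (List (List Int)))
    (hS : ∀ t, t ∈ S ↔ ∃ q ∈ done, ∃ j : Nat, 1 ≤ j ∧ j ≤ max q.length 1 ∧ t = q.take j)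
    (hkeys : D.keys = PySem.List.pyRange 1 ((k : Int) + 1) 1)
    (hD : ∀ m : Nat, 1 ≤ m → m ≤ k → D.getD (m : Int) [] = pvLvlList m done) :
    (∀ t, t ∈ (pvBPath (S, D) p).1 ↔
        ∃ q ∈ done ++ [p], ∃ j : Nat, 1 ≤ j ∧ j ≤ max q.length 1 ∧ t = q.take j)
    ∧ (pvBPath (S, D) p).2.keys = PySem.List.pyRange 1 ((k : Int) + 1) 1
    ∧ (∀ m : Nat, 1 ≤ m → m ≤ k →
        (pvBPath (S, D) p).2.getD (m : Int) [] = pvLvlList m (done ++ [p])) := by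
  obtain ⟨a, b, c⟩ := pvDepthAux k done p hp S D hS hkeys hD (max p.length 1) le_rfl
  unfold pvBPath
  rw [show max (p.length : Int) 1 = ((max p.length 1 : Nat) : Int) by simp [Nat.cast_max]]
  refine ⟨fun t => ?_, b, fun m h1 hk => ?_⟩
  · rw [a t]
    constructor
    · rintro (⟨q, hq, hrest⟩ | ⟨j, hj1, hje, rfl⟩)
      · exact ⟨q, by simp [hq], hrest⟩
      · exact ⟨p, by simp, j, hj1, hje, rfl⟩
    · rintro ⟨q, hq, j, hj1, hjq, rfl⟩
      rcases List.mem_append.mp hq with hq' | hq'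
      · exact Or.inl ⟨q, hq', j, hj1, hjq, rfl⟩
      · rcases List.mem_singleton.mp hq' with rfl
        exact Or.inr ⟨j, hj1, hjq, rfl⟩
  · rw [c m h1 hk]
    by_cases hme : m ≤ max p.length 1
    · rw [if_pos hme]
    · rw [if_neg hme, pvLvlSkip m done p (by omega)]

-- B's outer (path) loop invariant
lemma pvPathLoop (k : Nat) (D0 : PySem.Dict Int (List (List Int)))
    (hkeys : D0.keys = PySem.List.pyRange 1 ((k : Int) + 1) 1)
    (hD0 : ∀ m : Nat, 1 ≤ m → m ≤ k → D0.getD (m : Int) [] = []) :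
    ∀ done : List (List Int), (∀ p ∈ done, max p.length 1 ≤ k) →
    (∀ t, t ∈ (done.foldl pvBPath (PySem.Set.ofList [], D0)).1 ↔
        ∃ q ∈ done, ∃ j : Nat, 1 ≤ j ∧ j ≤ max q.length 1 ∧ t = q.take j)
    ∧ (done.foldl pvBPath (PySem.Set.ofList [], D0)).2.keys = PySem.List.pyRange 1 ((k : Int) + 1) 1
    ∧ (∀ m : Nat, 1 ≤ m → m ≤ k →
        (done.foldl pvBPath (PySem.Set.ofList [], D0)).2.getD (m : Int) [] = pvLvlList m done) := by
  intro done
  induction done using List.reverseRecOn with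
  | nil =>
    intro _
    refine ⟨fun t => ?_, hkeys, fun m h1 hk => ?_⟩
    · simp [PySem.Set.ofList]
    · simpa [pvLvlList] using hD0 m h1 hk
  | append_singleton done p ih =>
    intro hlen
    obtain ⟨a, b, c⟩ := ih (fun q hq => hlen q (by simp [hq]))
    rw [List.foldl_append, List.foldl_cons, List.foldl_nil]
    have h2 := pvDepthLoop k done p (hlen p (by simp))
      (done.foldl pvBPath (PySem.Set.ofList [], D0)).1
      (done.foldl pvBPath (PySem.Set.ofList [], D0)).2 a b c
    rw [Prod.mk.eta] at h2
    exact h2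

-- the keys of the literal level dict
lemma pvMkKeys (k : Nat) :
    (PySem.Dict.mk ((PySem.List.pyRange 1 ((k : Int) + 1) 1).map
        (fun lvl => (lvl, ([] : List (List Int)))))).keys =
      PySem.List.pyRange 1 ((k : Int) + 1) 1 := by
  simp only [PySem.Dict.keys_mk, List.map_map]
  have hcomp : ((fun x : Int × List (List Int) => x.1) ∘
      (fun lvl : Int => (lvl, ([] : List (List Int))))) = id := funext (fun _ => rfl)
  rw [hcomp, List.map_id]

-- the initial dict {lvl: [] for lvl in range(1, k+1)}
lemma pvInitDict (k : Nat) :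
    ((PySem.List.pyRange 1 ((k : Int) + 1) 1).foldl
        (fun d lvl => d.insert lvl ([] : List (List Int))) PySem.Dict.empty) =
      PySem.Dict.mk ((PySem.List.pyRange 1 ((k : Int) + 1) 1).map (fun lvl => (lvl, []))) := by
  apply PySem.Dict.ext
  have h := PySem.Dict.items_foldl_insert_fresh (PySem.List.pyRange 1 ((k : Int) + 1) 1)
    (fun lvl => lvl) (fun _ => ([] : List (List Int))) PySem.Dict.empty
    (fun a _ => by simp [PySem.Dict.contains_empty]) (by simpa using pvRangeNodup k)
  simpa [PySem.Dict.empty] using h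

-- ===== VERDICT (by name: the statement is the Claim_ definition above) =====
theorem initialize_paths_per_lvl_spec : Claim_equal_initialize_paths_per_lvl := by
  intro paths _ hpre
  unfold Spec_initialize_paths_per_lvl initialize_paths_per_lvl initialize_paths_per_lvl_alt
  cases hmax : PySem.List.max? (paths.map (fun path => (path.length : Int))) (fun x => x) with
  | none =>
    exact absurd (List.map_eq_nil_iff.mp ((PySem.List.max?_eq_none_iff _ _).mp hmax)) hpre
  | some length =>
    obtain ⟨p0, hp00, hlen0⟩ := List.mem_map.mp (PySem.List.max?_mem hmax)
    have h0 : 0 ≤ length := hlen0 ▸ Int.natCast_nonneg p0.length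
    have hcast : length = ((length.toNat : Nat) : Int) := (Int.toNat_of_nonneg h0).symm
    have hA := (pvOuterInv paths length.toNat).1
    simp only
    rw [hcast, hA]
    by_cases hz : length.toNat = 0
    · rw [if_pos (by rw [hz]; rfl), hz]
      rw [show ((0 : Nat) : Int) + 1 = 1 by norm_num, PySem.List.pyRange_one_eq_nil le_rfl]
      simp [pvBInit, PySem.List.pyRange_one_eq_nil, PySem.Dict.empty]
    · rw [if_neg (by exact_mod_cast hz)]
      have hlenall : ∀ p ∈ paths, max p.length 1 ≤ length.toNat := by
        intro p hp
        have h2 : (p.length : Int) ≤ length :=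
          PySem.List.max?_isMax hmax _ (List.mem_map_of_mem hp)
        omega
      have hd0 := pvInitDict length.toNat
      have hkeys0 : (pvBInit ((length.toNat : Nat) : Int)).keys =
          PySem.List.pyRange 1 (((length.toNat : Nat) : Int) + 1) 1 := by
        rw [pvBInit, hd0]
        exact pvMkKeys length.toNat
      have hD0 : ∀ m : Nat, 1 ≤ m → m ≤ length.toNat →
          (pvBInit ((length.toNat : Nat) : Int)).getD (m : Int) [] = [] := by
        intro m h1 hk
        rw [pvBInit, hd0]
        have hmemr : (m : Int) ∈ PySem.List.pyRange 1 (((length.toNat : Nat) : Int) + 1) 1 :=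
          PySem.List.mem_pyRange_one.mpr ⟨by omega, by omega⟩
        have hmemi : ((m : Int), ([] : List (List Int))) ∈
            (PySem.Dict.mk ((PySem.List.pyRange 1 (((length.toNat : Nat) : Int) + 1) 1).map
              (fun lvl => (lvl, ([] : List (List Int)))))).items :=
          List.mem_map_of_mem hmemr
        have hnd : (PySem.Dict.mk ((PySem.List.pyRange 1 (((length.toNat : Nat) : Int) + 1) 1).map
            (fun lvl => (lvl, ([] : List (List Int)))))).keys.Nodup := by
          rw [pvMkKeys]
          exact pvRangeNodup length.toNat
        exact PySem.Dict.getD_of_mem_items _ hmemi hnd []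
      obtain ⟨a, b, c⟩ := pvPathLoop length.toNat _ hkeys0 hD0 paths hlenall
      have hnodup : ((paths.foldl pvBPath
          (PySem.Set.ofList [], pvBInit ((length.toNat : Nat) : Int))).2).keys.Nodup := by
        rw [b]; exact pvRangeNodup length.toNat
      rw [PySem.Dict.items_eq_map_keys _ hnodup [], b]
      refine List.map_congr_left ?_
      intro lvl hlvl
      have hmemr := PySem.List.mem_pyRange_one.mp hlvl
      have hl : lvl = ((lvl.toNat : Nat) : Int) := by omega
      have hv := c lvl.toNat (by omega) (by omega)
      rw [hl, hv, show ((lvl.toNat : Nat) : Int).toNat = lvl.toNat by omega]
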